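-- pv_equiv track=rewrite | github.com/os-autoinst/salt-states-openqa | _modules/cpu_worker_classes.py | compute
-- ===== SOURCE A (Python) =====
-- x86_64_v2_flags = ['cx16', 'lahf', 'popcnt', 'sse4_1', 'sse4_2', 'ssse3']
--
-- x86_64_v3_flags = ['avx', 'avx2', 'bmi1', 'bmi2', 'f16c', 'fma', 'abm', 'movbe', 'xsave']
--
-- x86_64_v4_flags = ['avx512f', 'avx512bw', 'avx512cd', 'avx512dq', 'avx512vl']
--
-- def compute(cpu_arch, cpu_flags):
--     prefix = "cpu-"
--     worker_classes = [prefix + cpu_arch]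
--     if cpu_arch != "x86_64":
--         return worker_classes
--     if all(flag in cpu_flags for flag in x86_64_v2_flags):
--         worker_classes.append(prefix + "x86_64-v2")
--         if all(flag in cpu_flags for flag in x86_64_v3_flags):
--             worker_classes.append(prefix + "x86_64-v3")
--             if all(flag in cpu_flags for flag in x86_64_v4_flags):
--                 worker_classes.append(prefix + "x86_64-v4")
--     return worker_classes
-- ===== SOURCE B (Python) =====
-- x86_64_v2_flags = ['cx16', 'lahf', 'popcnt', 'sse4_1', 'sse4_2', 'ssse3']
-- x86_64_v3_flags = ['avx', 'avx2', 'bmi1', 'bmi2', 'f16c', 'fma', 'abm', 'movbe', 'xsave']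
-- x86_64_v4_flags = ['avx512f', 'avx512bw', 'avx512cd', 'avx512dq', 'avx512vl']
--
-- # every required flag, indexed by the tier (feature level) that first needs it
-- FLAG_TIER = {f: v for v, flags in ((2, x86_64_v2_flags),
--                                    (3, x86_64_v3_flags),
--                                    (4, x86_64_v4_flags)) for f in flags}
--
-- def compute(cpu_arch, cpu_flags):
--     prefix = "cpu-"
--     worker_classes = [prefix + cpu_arch]
--     if cpu_arch != "x86_64":
--         return worker_classes
--     present = set(cpu_flags)
--     cap = 5  # one past the highest tier; lowered to the lowest tier missing a flag
--     for f, v in FLAG_TIER.items():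
--         if f not in present and v < cap:
--             cap = v
--     worker_classes += [prefix + "x86_64-v%d" % v for v in range(2, cap)]
--     return worker_classes
-- ===== Notes on version B (the rewrite author's own statement) =====
-- stated objective: alternative
-- what changed: B inverts A's nested short-circuit cascade: it indexes every required flag by the tier that first needs it, computes in one pass the lowest tier with a missing flag (the cap), and generates the tier labels arithmetically from range(2, cap).
import Mathlib
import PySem

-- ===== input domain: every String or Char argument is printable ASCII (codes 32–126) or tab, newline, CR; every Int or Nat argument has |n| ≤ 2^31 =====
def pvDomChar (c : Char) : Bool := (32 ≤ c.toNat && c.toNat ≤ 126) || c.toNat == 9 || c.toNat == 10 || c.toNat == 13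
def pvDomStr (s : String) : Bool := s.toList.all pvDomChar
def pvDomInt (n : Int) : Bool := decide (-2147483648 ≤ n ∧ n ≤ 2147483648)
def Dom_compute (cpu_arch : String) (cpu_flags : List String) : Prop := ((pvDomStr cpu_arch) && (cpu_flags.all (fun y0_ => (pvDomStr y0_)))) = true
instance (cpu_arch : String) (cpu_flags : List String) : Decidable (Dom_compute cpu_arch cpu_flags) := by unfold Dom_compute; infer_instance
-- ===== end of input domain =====

-- B inverts A's nested cascade: it indexes each required flag by its tier, computes the lowest
-- tier with a missing flag in one pass, and generates the labels from range(2, cap) (alternative).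

-- ===== PORT A =====
def x86_64_v2_flags : List String := ["cx16", "lahf", "popcnt", "sse4_1", "sse4_2", "ssse3"]
def x86_64_v3_flags : List String := ["avx", "avx2", "bmi1", "bmi2", "f16c", "fma", "abm", "movbe", "xsave"]
def x86_64_v4_flags : List String := ["avx512f", "avx512bw", "avx512cd", "avx512dq", "avx512vl"]

def compute (cpu_arch : String) (cpu_flags : List String) : List String :=
  let pfx := "cpu-"
  let worker_classes := [pfx ++ cpu_arch]
  if cpu_arch ≠ "x86_64" then worker_classes
  else
    if x86_64_v2_flags.all (fun flag => cpu_flags.contains flag) then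
      let worker_classes := worker_classes ++ [pfx ++ "x86_64-v2"]
      if x86_64_v3_flags.all (fun flag => cpu_flags.contains flag) then
        let worker_classes := worker_classes ++ [pfx ++ "x86_64-v3"]
        if x86_64_v4_flags.all (fun flag => cpu_flags.contains flag) then
          worker_classes ++ [pfx ++ "x86_64-v4"]
        else worker_classes
      else worker_classes
    else worker_classes

-- ===== PORT B =====
-- FLAG_TIER: dict comprehension over the three tier lists; keys are distinct, so the
-- association list in insertion order is exactly these maps concatenated.
def pvFlagTier : List (String × Int) :=
  x86_64_v2_flags.map (fun f => (f, (2 : Int)))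
    ++ x86_64_v3_flags.map (fun f => (f, (3 : Int)))
    ++ x86_64_v4_flags.map (fun f => (f, (4 : Int)))

def compute_alt (cpu_arch : String) (cpu_flags : List String) : List String :=
  let pfx := "cpu-"
  let worker_classes := [pfx ++ cpu_arch]
  if cpu_arch ≠ "x86_64" then worker_classes
  else
    let present := PySem.Set.ofList cpu_flags
    let cap : Int := pvFlagTier.foldl
      (fun cap fv => if ¬ PySem.Set.contains present fv.1 ∧ fv.2 < cap then fv.2 else cap) 5
    worker_classes ++ (PySem.List.pyRange 2 cap 1).map (fun v => pfx ++ ("x86_64-v" ++ PySem.Int.toStr v))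

-- ===== PRECONDITION & SPEC =====
def Spec_compute (cpu_arch : String) (cpu_flags : List String) (out : List String) : Prop := out = compute_alt cpu_arch cpu_flags
instance (cpu_arch : String) (cpu_flags : List String) (out : List String) : Decidable (Spec_compute cpu_arch cpu_flags out) := by unfold Spec_compute; infer_instance

-- ===== CLAIM (what is proved, stated in full; the proofs are below) =====
def Claim_equal_compute : Prop := ∀ (cpu_arch : String) (cpu_flags : List String), Dom_compute cpu_arch cpu_flags → Spec_compute cpu_arch cpu_flags (compute cpu_arch cpu_flags)

-- ===== LEMMAS AND PROOFS =====

-- one constant-tier segment of the fold: lowers the accumulator to (min acc v) iff a flag is missing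
theorem pvFoldSegment (cpu_flags : List String) (flags : List String) (v acc : Int) :
    (flags.map (fun f => (f, v))).foldl
        (fun cap fv => if ¬ PySem.Set.contains (PySem.Set.ofList cpu_flags) fv.1 ∧ fv.2 < cap then fv.2 else cap) acc
      = if flags.all (fun flag => cpu_flags.contains flag) then acc else min acc v := by
  induction flags generalizing acc with
  | nil => simp
  | cons f fs ih =>
    simp only [List.map_cons, List.foldl_cons, PySem.Set.contains_iff, PySem.Set.mem_ofList,
      List.all_cons, Bool.and_eq_true, List.all_eq_true, List.contains_iff_mem] at ih ⊢
    by_cases hf : f ∈ cpu_flags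
    · simp only [hf, not_true_eq_false, false_and, if_false, ih, true_and]
    · simp only [hf, not_false_eq_true, true_and, false_and, if_false, ih]
      split_ifs <;> omega

-- ===== VERDICT (by name: the statement is the Claim_ definition above) =====
theorem compute_spec : Claim_equal_compute := by
  intro cpu_arch cpu_flags _
  unfold Spec_compute compute compute_alt
  by_cases h : cpu_arch = "x86_64"
  · simp only [h, ne_eq, not_true_eq_false, if_false, pvFlagTier, List.foldl_append,
      pvFoldSegment, List.all_eq_true, List.contains_iff_mem]
    split_ifs <;> decide
  · simp [h]
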